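-- pv_equiv track=rewrite | github.com/nvmexp/lw_runtime | libraries/lwblas/test/scripts/helpers/utility.py | get_flags_list_intersection
-- ===== SOURCE A (Python) =====
-- def get_flags_intersection(flags_a, flags_b):
--     intersecting_flags = set()
--
--     for flag in flags_a:
--         if not (flag in flags_b) or flags_a[flag] != flags_b[flag]:
--             intersecting_flags.add(flag)
--
--     for flag in flags_b:
--         if not (flag in flags_a) or flags_b[flag] != flags_a[flag]:
--             intersecting_flags.add(flag)
--
--     return intersecting_flags
--
-- def get_flags_list_intersection(flags_list):
--
--     if flags_list == None:
--         raise Exception("None is not a valid flags list")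
--
--     if len(flags_list) == 0:
--         raise Exception("Empty flags list given")
--
--     intersecting_flags = set()
--
--     base_flags = flags_list[0]
--
--     for flags in flags_list[1:]:
--         intersecting_flags = intersecting_flags.union(get_flags_intersection(base_flags, flags))
--
--     return intersecting_flags
-- ===== SOURCE B (Python) =====
-- def get_flags_list_intersection(flags_list):
--
--     if flags_list == None:
--         raise Exception("None is not a valid flags list")
--
--     if len(flags_list) == 0:
--         raise Exception("Empty flags list given")
--
--     base_items = list(flags_list[0].items())
--
--     result = set()
--
--     for flags in flags_list[1:]:
--         # multiset of item tuples from both dicts: an item occurring exactly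
--         # once belongs to only one of the two dicts, so its key differs
--         items = base_items + list(flags.items())
--         counts = {}
--         for it in items:
--             counts[it] = counts.get(it, 0) + 1
--         result.update(k for k, v in items if counts[(k, v)] == 1)
--
--     return result
-- ===== Notes on version B (the rewrite author's own statement) =====
-- stated objective: alternative
-- what changed: Per remaining dict, B never probes the other dict: it concatenates the two dicts' item tuples, counts item multiplicities in one hashing pass, and collects the keys of items occurring exactly once (present in only one side), instead of A's two loops each testing key membership and comparing values in the opposite dict.
import Mathlib
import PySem

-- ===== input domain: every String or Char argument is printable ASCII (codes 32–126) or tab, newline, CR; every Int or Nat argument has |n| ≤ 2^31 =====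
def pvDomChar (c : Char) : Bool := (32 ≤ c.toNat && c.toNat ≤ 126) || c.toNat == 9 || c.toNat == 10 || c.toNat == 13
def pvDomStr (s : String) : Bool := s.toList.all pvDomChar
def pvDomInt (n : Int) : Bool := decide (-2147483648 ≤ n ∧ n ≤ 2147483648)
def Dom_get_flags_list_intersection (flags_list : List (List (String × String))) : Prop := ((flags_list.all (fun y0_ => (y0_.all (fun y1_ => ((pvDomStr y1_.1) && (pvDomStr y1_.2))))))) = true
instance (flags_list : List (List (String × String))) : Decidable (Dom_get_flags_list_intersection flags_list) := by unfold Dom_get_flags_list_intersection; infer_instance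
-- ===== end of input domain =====

-- B replaces A's per-pair membership-probing loops (look each key up in the other dict and
-- compare values) by multiset counting: concatenate both dicts' item tuples, count item
-- multiplicities in one pass, and keep the keys of items occurring exactly once.
-- Same asymptotic cost ('alternative'); equivalence is about the RETURN value.
-- Output is a Python set (distinct Strings, compared as a finite set).

-- ===== PORT A =====
-- helper get_flags_intersection: two loops over the keys, adding a key when it is missing from
-- the other dict or the values differ (short-circuit 'or' makes getD safe where Python indexes).
def pv_get_flags_intersection (flags_a flags_b : PySem.Dict String String) : PySem.Set String :=
  let s1 := flags_a.keys.foldl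
    (fun acc flag =>
      if !(flags_b.contains flag) || flags_a.getD flag "" != flags_b.getD flag "" then
        PySem.Set.add acc flag
      else acc)
    PySem.Set.empty
  flags_b.keys.foldl
    (fun acc flag =>
      if !(flags_a.contains flag) || flags_b.getD flag "" != flags_a.getD flag "" then
        PySem.Set.add acc flag
      else acc)
    s1

def get_flags_list_intersection (flags_list : List (List (String × String))) : List String :=
  let base_flags := PySem.Dict.ofList (PySem.List.pyGetD flags_list 0 [])
  (PySem.List.slice flags_list (some 1) none).foldl
    (fun acc flags =>
      PySem.Set.union acc (pv_get_flags_intersection base_flags (PySem.Dict.ofList flags)))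
    PySem.Set.empty

-- ===== PORT B =====
-- per remaining dict: items = base_items + flags.items(); one counting pass over items
-- ('counts[it] = counts.get(it, 0) + 1'); keep keys of items with count 1.
def get_flags_list_intersection_alt (flags_list : List (List (String × String))) : List String :=
  let base_items := (PySem.Dict.ofList (PySem.List.pyGetD flags_list 0 [])).items
  (PySem.List.slice flags_list (some 1) none).foldl
    (fun acc flags =>
      let items := base_items ++ (PySem.Dict.ofList flags).items
      let counts := items.foldl
        (fun d it => d.insert it (d.getD it (0 : Int) + 1)) PySem.Dict.empty
      PySem.Set.update acc
        ((items.filter (fun it => counts.getD it (0 : Int) == 1)).map (·.1)))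
    PySem.Set.empty

-- ===== PRECONDITION & SPEC =====
-- A (and B) raise Exception("Empty flags list given") on the empty list; Pre_ excludes exactly that.
def Pre_get_flags_list_intersection (flags_list : List (List (String × String))) : Prop :=
  flags_list ≠ []
instance (flags_list : List (List (String × String))) : Decidable (Pre_get_flags_list_intersection flags_list) := by unfold Pre_get_flags_list_intersection; infer_instance

def pvWitness_get_flags_list_intersection : (List (List (String × String))) :=
  [[("a", "1"), ("b", "2")], [("a", "3")]]

def Spec_get_flags_list_intersection (flags_list : List (List (String × String))) (out : List String) : Prop := out = get_flags_list_intersection_alt flags_list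
instance (flags_list : List (List (String × String))) (out : List String) : Decidable (Spec_get_flags_list_intersection flags_list out) := by unfold Spec_get_flags_list_intersection; infer_instance

-- ===== CLAIM (what is proved, stated in full; the proofs are below) =====
def Claim_equal_get_flags_list_intersection : Prop := ∀ (flags_list : List (List (String × String))), Dom_get_flags_list_intersection flags_list → Pre_get_flags_list_intersection flags_list → Spec_get_flags_list_intersection flags_list (get_flags_list_intersection flags_list)

-- ===== LEMMAS AND PROOFS =====

-- a guarded add-loop is an update with the filtered list
theorem pv_foldl_if_add {α : Type} [BEq α] (p : α → Bool) (L : List α) (s : PySem.Set α) :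
    L.foldl (fun acc x => if p x then PySem.Set.add acc x else acc) s
      = PySem.Set.update s (L.filter p) := by
  induction L generalizing s with
  | nil => rfl
  | cons x L ih =>
    simp only [List.foldl_cons, List.filter_cons]
    by_cases h : p x = true
    · simp [h, ih, PySem.Set.update]
    · simp [h, ih, PySem.Set.update]

theorem pv_update_append {α : Type} [BEq α] (s : PySem.Set α) (L1 L2 : List α) :
    PySem.Set.update s (L1 ++ L2) = PySem.Set.update (PySem.Set.update s L1) L2 := by
  simp [PySem.Set.update, List.foldl_append]

theorem pv_add_of_mem {α : Type} [BEq α] [LawfulBEq α] (s : PySem.Set α) (x : α)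
    (h : x ∈ s) : PySem.Set.add s x = s := by
  simp [PySem.Set.add, PySem.Set.contains, h]

theorem pv_mem_add {α : Type} [BEq α] [LawfulBEq α] (s : PySem.Set α) (x y : α)
    (h : x ∈ s ∨ x = y) : x ∈ PySem.Set.add s y := by
  rcases h with h | rfl <;> unfold PySem.Set.add <;> split <;>
    simp_all [PySem.Set.contains]

theorem pv_mem_update {α : Type} [BEq α] [LawfulBEq α] (s : PySem.Set α) (L : List α) (x : α)
    (h : x ∈ s ∨ x ∈ L) : x ∈ PySem.Set.update s L := by
  induction L generalizing s with
  | nil => simpa using h.resolve_right (by simp)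
  | cons y L ih =>
    simp only [PySem.Set.update, List.foldl_cons] at *
    refine ih _ ?_
    rcases h with h | h
    · exact Or.inl (pv_mem_add s x y (Or.inl h))
    · rcases List.mem_cons.mp h with rfl | h
      · exact Or.inl (pv_mem_add s x x (Or.inr rfl))
      · exact Or.inr h

theorem pv_update_add {α : Type} [BEq α] [LawfulBEq α] (s t : PySem.Set α) (x : α) :
    PySem.Set.update s (PySem.Set.add t x) = PySem.Set.add (PySem.Set.update s t) x := by
  by_cases h : PySem.Set.contains t x = true
  · have hx : x ∈ t := by simpa [PySem.Set.contains, List.contains_iff_mem] using h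
    rw [PySem.Set.add, if_pos h,
      pv_add_of_mem _ _ (pv_mem_update s t x (Or.inr hx))]
  · rw [PySem.Set.add, if_neg h]
    simp [PySem.Set.update, PySem.Set.add]

theorem pv_update_update {α : Type} [BEq α] [LawfulBEq α] (s t : PySem.Set α) (L : List α) :
    PySem.Set.update s (PySem.Set.update t L) = PySem.Set.update (PySem.Set.update s t) L := by
  induction L generalizing t with
  | nil => rfl
  | cons x L ih =>
    simp only [PySem.Set.update, List.foldl_cons] at *
    rw [ih (PySem.Set.add t x)]
    congr 1
    exact pv_update_add s t x

-- the counting loop computes list multiplicity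
theorem pv_counts_eq (items : List (String × String)) (it : String × String) :
    (items.foldl (fun d x => d.insert x (d.getD x (0 : Int) + 1)) PySem.Dict.empty).getD it 0
      = (items.count it : Int) := by
  rw [PySem.Dict.getD_foldl_insert_add_one, PySem.Dict.getD_empty]
  ring

-- in a concatenation of two nodup lists, an element of the first occurs exactly once
-- iff it is absent from the second
theorem pv_count_one_iff {α : Type} [BEq α] [LawfulBEq α] (L1 L2 : List α) (x : α)
    (h1 : L1.Nodup) (h2 : L2.Nodup) (hx : x ∈ L1) :
    (((L1 ++ L2).count x : Int) == 1) = !(L2.contains x) := by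
  have c1 : L1.count x = 1 := List.count_eq_one_of_mem h1 hx
  rw [List.count_append, c1]
  by_cases hm : x ∈ L2
  · have c2 : L2.count x = 1 := List.count_eq_one_of_mem h2 hm
    simp [c2, hm]
  · have c2 : L2.count x = 0 := List.count_eq_zero.mpr hm
    simp [c2, hm]

-- (k, v) is an item of d iff d has key k with value v (nodup keys)
theorem pv_mem_items_iff (d : PySem.Dict String String) (hd : d.keys.Nodup) (k v : String) :
    ((k, v) ∈ d.items) ↔ (d.contains k = true ∧ d.getD k "" = v) := by
  rw [← PySem.Dict.get?_eq_some_iff_mem_items d k v hd]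
  cases hg : d.get? k with
  | none => simp [PySem.Dict.contains_eq_isSome_get?, hg]
  | some w =>
    simp [PySem.Dict.contains_eq_isSome_get?, hg, PySem.Dict.getD_eq_get?_getD]

-- the item-tuple membership test IS the helper's boolean condition
theorem pv_pred_eq (x y : PySem.Dict String String) (hy : y.keys.Nodup) (k : String) :
    (!(y.items.contains (k, x.getD k "")))
      = (!(y.contains k) || x.getD k "" != y.getD k "") := by
  have hm := pv_mem_items_iff y hy k (x.getD k "")
  by_cases hc : y.contains k = true
  · by_cases he : y.getD k "" = x.getD k ""
    · have hmem : (k, x.getD k "") ∈ y.items := hm.mpr ⟨hc, he⟩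
      simp [hmem, hc, he]
    · have hne : x.getD k "" ≠ y.getD k "" := fun h => he h.symm
      have hmem : (k, x.getD k "") ∉ y.items := fun h => he (hm.mp h).2
      simp [hmem, hc, hne]
  · simp [hm, hc]

-- the '∉ other dict's items' filter over x.items, projected to keys, is A's key filter
theorem pv_side_eq (x y : PySem.Dict String String) (hx : x.keys.Nodup) (hy : y.keys.Nodup) :
    (List.filter (fun it => !(y.items.contains it)) x.items).map (·.1)
      = x.keys.filter (fun flag => !(y.contains flag) || x.getD flag "" != y.getD flag "") := by
  conv_lhs => rw [PySem.Dict.items_eq_map_keys x hx ""]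
  rw [List.filter_map, List.map_map]
  have hcomp : ((fun (p : String × String) => p.1) ∘ fun k => (k, x.getD k "")) =
      fun (k : String) => k := rfl
  rw [hcomp, List.map_id']
  refine List.filter_congr ?_
  intro k _
  exact pv_pred_eq x y hy k

-- the per-pair bodies agree: A's helper unioned into acc = B's count-filter updated into acc
theorem pv_pair_eq (a b : PySem.Dict String String) (ha : a.keys.Nodup) (hb : b.keys.Nodup)
    (acc : PySem.Set String) :
    PySem.Set.union acc (pv_get_flags_intersection a b)
      = PySem.Set.update acc
          (((a.items ++ b.items).filter
              (fun it =>
                ((a.items ++ b.items).foldl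
                    (fun d x => d.insert x (d.getD x (0 : Int) + 1)) PySem.Dict.empty).getD it (0 : Int) == 1)).map
            (·.1)) := by
  have hia : a.items.Nodup := List.Nodup.of_map _ (by simpa [PySem.Dict.keys] using ha)
  have hib : b.items.Nodup := List.Nodup.of_map _ (by simpa [PySem.Dict.keys] using hb)
  -- B side: counts are multiplicities; split the filter over the append
  have hf : ((a.items ++ b.items).filter
      (fun it =>
        ((a.items ++ b.items).foldl
            (fun d x => d.insert x (d.getD x (0 : Int) + 1)) PySem.Dict.empty).getD it (0 : Int) == 1))
      = a.items.filter (fun it => !(b.items.contains it))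
        ++ b.items.filter (fun it => !(a.items.contains it)) := by
    rw [List.filter_append]
    congr 1
    · refine List.filter_congr ?_
      intro it hit
      rw [pv_counts_eq]
      exact pv_count_one_iff a.items b.items it hia hib hit
    · refine List.filter_congr ?_
      intro it hit
      rw [pv_counts_eq]
      have hperm : (a.items ++ b.items).count it = (b.items ++ a.items).count it :=
        List.Perm.count_eq (List.perm_append_comm) it
      rw [hperm]
      exact pv_count_one_iff b.items a.items it hib hia hit
  rw [hf, List.map_append, pv_update_append,
    pv_side_eq a b ha hb, pv_side_eq b a hb ha]
  -- A side: the two guarded loops are two updates with the filtered key lists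
  unfold pv_get_flags_intersection PySem.Set.union
  rw [pv_foldl_if_add, pv_foldl_if_add, pv_update_update, pv_update_update]
  rfl

-- ===== VERDICT (by name: the statement is the Claim_ definition above) =====
theorem get_flags_list_intersection_spec : Claim_equal_get_flags_list_intersection := by
  intro flags_list _ _
  unfold Spec_get_flags_list_intersection
  unfold get_flags_list_intersection get_flags_list_intersection_alt
  have hstep :
      (fun (acc : PySem.Set String) (flags : List (String × String)) =>
        PySem.Set.union acc
          (pv_get_flags_intersection
            (PySem.Dict.ofList (PySem.List.pyGetD flags_list 0 [])) (PySem.Dict.ofList flags)))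
      = (fun (acc : PySem.Set String) (flags : List (String × String)) =>
        let items := (PySem.Dict.ofList (PySem.List.pyGetD flags_list 0 [])).items
          ++ (PySem.Dict.ofList flags).items
        let counts := items.foldl
          (fun d it => d.insert it (d.getD it (0 : Int) + 1)) PySem.Dict.empty
        PySem.Set.update acc
          ((items.filter (fun it => counts.getD it (0 : Int) == 1)).map (·.1))) := by
    funext acc flags
    exact pv_pair_eq _ _ (PySem.Dict.nodup_keys_ofList _) (PySem.Dict.nodup_keys_ofList _) acc
  show List.foldl _ PySem.Set.empty (PySem.List.slice flags_list (some 1) none)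
    = List.foldl _ PySem.Set.empty (PySem.List.slice flags_list (some 1) none)
  rw [hstep]
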